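-- pv_equiv track=rewrite | github.com/akatsuyama/LigX | LigX/LigX_core.py | atomname_change_before_link_n
-- ===== SOURCE A (Python) =====
-- def atomname_change_before_link_n(atom_list):
--     atom_list = ['C' if x == 'YCA' else x for x in atom_list]
--     atom_list = ['C' if x == 'YCO' else x for x in atom_list]
--     atom_list = ['O' if x == 'YO' else x for x in atom_list]
--     atom_list = ['S' if x == 'YS' else x for x in atom_list]
--     atom_list = ['S' if x == 'YSA' else x for x in atom_list]
--     atom_list = ['N' if x == 'YNA' else x for x in atom_list]
--     atom_list = ['N' if x == 'YN3' else x for x in atom_list]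
--     atom_list = ['N' if x == 'YN2' else x for x in atom_list]
--     return atom_list
-- ===== SOURCE B (Python) =====
-- _MAP = {'YCA': 'C', 'YCO': 'C', 'YO': 'O', 'YS': 'S', 'YSA': 'S',
--         'YNA': 'N', 'YN3': 'N', 'YN2': 'N'}
--
-- def atomname_change_before_link_n(atom_list):
--     return [_MAP.get(x, x) for x in atom_list]
-- ===== Notes on version B (the rewrite author's own statement) =====
-- stated objective: simpler
-- what changed: Replaces A's eight sequential full-list rewrite passes (one list comprehension per token) with a single replacement table built once and one pass over atom_list using dict.get(x, x).
import Mathlib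
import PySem

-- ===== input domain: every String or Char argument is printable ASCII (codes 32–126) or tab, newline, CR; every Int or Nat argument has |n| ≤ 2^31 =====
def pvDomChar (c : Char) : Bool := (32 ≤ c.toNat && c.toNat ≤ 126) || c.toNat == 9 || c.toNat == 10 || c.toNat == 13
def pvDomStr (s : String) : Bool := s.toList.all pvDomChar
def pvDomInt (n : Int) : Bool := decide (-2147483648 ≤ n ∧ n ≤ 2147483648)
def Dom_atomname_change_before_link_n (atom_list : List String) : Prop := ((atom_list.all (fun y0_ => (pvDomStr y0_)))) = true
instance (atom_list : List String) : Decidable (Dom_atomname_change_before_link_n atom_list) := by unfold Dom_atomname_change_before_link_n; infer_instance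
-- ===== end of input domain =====

-- B replaces A's eight sequential full-list rewrite passes with one table-driven pass (simpler, one traversal).


-- ===== PORT A =====
-- eight successive list comprehensions, exactly as in the Python
def atomname_change_before_link_n (atom_list : List String) : List String :=
  let a1 := atom_list.map (fun x => if x == "YCA" then "C" else x)
  let a2 := a1.map (fun x => if x == "YCO" then "C" else x)
  let a3 := a2.map (fun x => if x == "YO" then "O" else x)
  let a4 := a3.map (fun x => if x == "YS" then "S" else x)
  let a5 := a4.map (fun x => if x == "YSA" then "S" else x)
  let a6 := a5.map (fun x => if x == "YNA" then "N" else x)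
  let a7 := a6.map (fun x => if x == "YN3" then "N" else x)
  let a8 := a7.map (fun x => if x == "YN2" then "N" else x)
  a8

-- ===== PORT B =====
-- the replacement table _MAP from Source B
def pvMap_atomname : PySem.Dict String String :=
  PySem.Dict.ofList [("YCA", "C"), ("YCO", "C"), ("YO", "O"), ("YS", "S"),
                     ("YSA", "S"), ("YNA", "N"), ("YN3", "N"), ("YN2", "N")]

def atomname_change_before_link_n_alt (atom_list : List String) : List String :=
  atom_list.map (fun x => PySem.Dict.getD pvMap_atomname x x)

-- ===== PRECONDITION & SPEC =====
def Spec_atomname_change_before_link_n (atom_list : List String) (out : List String) : Prop := out = atomname_change_before_link_n_alt atom_list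
instance (atom_list : List String) (out : List String) : Decidable (Spec_atomname_change_before_link_n atom_list out) := by unfold Spec_atomname_change_before_link_n; infer_instance

-- ===== CLAIM (what is proved, stated in full; the proofs are below) =====
def Claim_equal_atomname_change_before_link_n : Prop := ∀ (atom_list : List String), Dom_atomname_change_before_link_n atom_list → Spec_atomname_change_before_link_n atom_list (atomname_change_before_link_n atom_list)

-- ===== LEMMAS AND PROOFS =====
-- pointwise: A's chain of eight conditional rewrites equals B's table lookup
theorem atomname_pointwise (x : String) :
    (let y1 := if x == "YCA" then "C" else x
     let y2 := if y1 == "YCO" then "C" else y1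
     let y3 := if y2 == "YO" then "O" else y2
     let y4 := if y3 == "YS" then "S" else y3
     let y5 := if y4 == "YSA" then "S" else y4
     let y6 := if y5 == "YNA" then "N" else y5
     let y7 := if y6 == "YN3" then "N" else y6
     if y7 == "YN2" then "N" else y7)
    = PySem.Dict.getD pvMap_atomname x x := by
  by_cases h1 : "YCA" = x
  · subst h1; decide
  by_cases h2 : "YCO" = x
  · subst h2; decide
  by_cases h3 : "YO" = x
  · subst h3; decide
  by_cases h4 : "YS" = x
  · subst h4; decide
  by_cases h5 : "YSA" = x
  · subst h5; decide
  by_cases h6 : "YNA" = x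
  · subst h6; decide
  by_cases h7 : "YN3" = x
  · subst h7; decide
  by_cases h8 : "YN2" = x
  · subst h8; decide
  have h1' : ¬ x = "YCA" := fun h => h1 h.symm
  have h2' : ¬ x = "YCO" := fun h => h2 h.symm
  have h3' : ¬ x = "YO" := fun h => h3 h.symm
  have h4' : ¬ x = "YS" := fun h => h4 h.symm
  have h5' : ¬ x = "YSA" := fun h => h5 h.symm
  have h6' : ¬ x = "YNA" := fun h => h6 h.symm
  have h7' : ¬ x = "YN3" := fun h => h7 h.symm
  have h8' : ¬ x = "YN2" := fun h => h8 h.symm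
  simp [pvMap_atomname, PySem.Dict.getD_eq_get?_getD, PySem.Dict.ofList,
        PySem.Dict.get?_insert, PySem.Dict.get?_empty, PySem.Dict.update,
        h1', h2', h3', h4', h5', h6', h7', h8']

-- ===== VERDICT (by name: the statement is the Claim_ definition above) =====
theorem atomname_change_before_link_n_spec : Claim_equal_atomname_change_before_link_n := by
  intro atom_list _
  unfold Spec_atomname_change_before_link_n atomname_change_before_link_n atomname_change_before_link_n_alt
  simp only [List.map_map]
  apply List.map_congr_left
  intro x _
  simpa using atomname_pointwise x
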